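-- pv_equiv track=rewrite | github.com/RyanLuong1/WikiBot | bot.py | add_trailing_dots
-- ===== SOURCE A (Python) =====
-- def add_trailing_dots(summary):
--     summary = summary[:2048]
--     white_space_occurence = len(summary)
--     first_white_space_found = False
--     for char in reversed(range(0, len(summary))):
--         if summary[char].isspace():
--             if not first_white_space_found:
--                 first_white_space_found = True
--             else:
--                 break;
--         white_space_occurence -= 1;
--     how_many_trailing_dots = len(summary) - white_space_occurence
--     summary = summary[:white_space_occurence - 1] + ('.')*how_many_trailing_dots
--     return summary
-- ===== SOURCE B (Python) =====
-- def add_trailing_dots(summary):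
--     summary = summary[:2048]
--     positions = [i for i, c in enumerate(summary) if c.isspace()]
--     wso = positions[-2] + 1 if len(positions) >= 2 else 0
--     return summary[:wso - 1] + '.' * (len(summary) - wso)
-- ===== Notes on version B (the rewrite author's own statement) =====
-- stated objective: simpler
-- what changed: A's backward index loop with a break and a decrementing counter is replaced by a forward comprehension collecting all whitespace positions and indexing the second-from-last (positions[-2]).
import Mathlib
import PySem

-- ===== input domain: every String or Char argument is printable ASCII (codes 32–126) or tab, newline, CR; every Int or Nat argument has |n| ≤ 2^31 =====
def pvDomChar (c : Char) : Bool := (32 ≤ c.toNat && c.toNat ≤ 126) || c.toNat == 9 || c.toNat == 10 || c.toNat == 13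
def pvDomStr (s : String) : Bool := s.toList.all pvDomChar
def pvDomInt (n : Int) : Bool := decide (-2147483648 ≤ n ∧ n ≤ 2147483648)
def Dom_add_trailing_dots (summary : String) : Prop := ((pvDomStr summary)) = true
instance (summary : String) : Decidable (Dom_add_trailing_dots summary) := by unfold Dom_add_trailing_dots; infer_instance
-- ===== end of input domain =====

-- B replaces A's backward counter-loop-with-early-break by a forward comprehension of all
-- whitespace positions, indexing the second-from-last (objective: simpler).

-- ===== PORT A =====
-- backward loop with early break: state (white_space_occurence, first_white_space_found)
def pvALoop (s : List Char) : List Int → Int → Bool → Int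
  | [], wso, _ => wso
  | i :: rest, wso, found =>
    if PySem.Chars.isspace (PySem.List.pyGetD s i ' ') then
      if !found then pvALoop s rest (wso - 1) true
      else wso
    else pvALoop s rest (wso - 1) found

def add_trailing_dots (summary : String) : String :=
  let s := PySem.List.slice summary.toList none (some 2048)
  let wso := pvALoop s ((PySem.List.pyRange 0 (s.length : Int) 1).reverse) (s.length : Int) false
  let dots := (s.length : Int) - wso
  String.ofList (PySem.List.slice s none (some (wso - 1)) ++ List.replicate dots.toNat '.')

-- ===== PORT B =====
def add_trailing_dots_alt (summary : String) : String :=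
  let s := PySem.List.slice summary.toList none (some 2048)
  let positions := ((PySem.List.enumerate s).filter (fun p => PySem.Chars.isspace p.2)).map (fun p => p.1)
  let wso : Int := if 2 ≤ positions.length then PySem.List.pyGetD positions (-2) 0 + 1 else 0
  String.ofList (PySem.List.slice s none (some (wso - 1)) ++ List.replicate ((s.length : Int) - wso).toNat '.')

-- ===== PRECONDITION & SPEC =====
def Spec_add_trailing_dots (summary : String) (out : String) : Prop := out = add_trailing_dots_alt summary
instance (summary : String) (out : String) : Decidable (Spec_add_trailing_dots summary out) := by unfold Spec_add_trailing_dots; infer_instance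

-- ===== CLAIM (what is proved, stated in full; the proofs are below) =====
def Claim_equal_add_trailing_dots : Prop := ∀ (summary : String), Dom_add_trailing_dots summary → Spec_add_trailing_dots summary (add_trailing_dots summary)

-- ===== LEMMAS AND PROOFS =====

-- char-level version of A's loop (the index loop reads s[i] for descending i, i.e. walks s.reverse)
def pvCharLoop : List Char → Int → Bool → Int
  | [], wso, _ => wso
  | c :: rest, wso, found =>
    if PySem.Chars.isspace c then
      if !found then pvCharLoop rest (wso - 1) true
      else wso
    else pvCharLoop rest (wso - 1) found

-- ascending whitespace positions, as B computes them
def pvPos (t : List Char) : List Int :=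
  ((PySem.List.enumerate t).filter (fun p => PySem.Chars.isspace p.2)).map (fun p => p.1)

lemma pvALoop_eq_charLoop (s : List Char) (l : List Int) (w : Int) (b : Bool) :
    pvALoop s l w b = pvCharLoop (l.map (fun i => PySem.List.pyGetD s i ' ')) w b := by
  induction l generalizing w b with
  | nil => rfl
  | cons i rest ih =>
    simp only [pvALoop, pvCharLoop, List.map]
    split_ifs <;> simp [ih]

lemma enumerate_append_singleton (xs : List Char) (x : Char) (a : Int) :
    PySem.List.enumerate (xs ++ [x]) a = PySem.List.enumerate xs a ++ [(a + xs.length, x)] := by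
  induction xs generalizing a with
  | nil => simp [PySem.List.enumerate_nil, PySem.List.enumerate_cons]
  | cons y ys ih =>
    simp only [List.cons_append, PySem.List.enumerate_cons, ih, List.length_cons]
    have h' : a + 1 + (ys.length : Int) = a + ((ys.length + 1 : Nat) : Int) := by push_cast; ring
    rw [h']

lemma pvPos_append (t : List Char) (c : Char) :
    pvPos (t ++ [c]) = pvPos t ++ (if PySem.Chars.isspace c then [((t.length : Int))] else []) := by
  simp only [pvPos, enumerate_append_singleton, List.filter_append, List.map_append]
  split_ifs with h <;> simp [List.filter, h]

lemma charLoop_true (t : List Char) :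
    pvCharLoop t.reverse (t.length : Int) true
      = if pvPos t = [] then 0 else (pvPos t).getD ((pvPos t).length - 1) 0 + 1 := by
  induction t using List.reverseRecOn with
  | nil => simp [pvCharLoop, pvPos]
  | append_singleton t c ih =>
    rw [List.reverse_append]
    by_cases h : PySem.Chars.isspace c
    · simp [pvCharLoop, h, pvPos_append, List.getD]
    · simpa [pvCharLoop, h, pvPos_append] using ih

lemma charLoop_false (t : List Char) :
    pvCharLoop t.reverse (t.length : Int) false
      = if 2 ≤ (pvPos t).length then (pvPos t).getD ((pvPos t).length - 2) 0 + 1 else 0 := by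
  induction t using List.reverseRecOn with
  | nil => simp [pvCharLoop, pvPos]
  | append_singleton t c ih =>
    rw [List.reverse_append]
    by_cases h : PySem.Chars.isspace c
    · simp only [List.reverse_singleton, List.singleton_append]
      simp only [pvCharLoop, h, Bool.not_false, if_pos, List.length_append]
      rw [show ((t.length + [c].length : Nat) : Int) - 1 = (t.length : Int) from by simp]
      rw [charLoop_true t, pvPos_append, h, if_pos rfl]
      by_cases he : pvPos t = []
      · simp [he]
      · have hl : 1 ≤ (pvPos t).length := List.length_pos_of_ne_nil he
        simp only [he, if_false]
        have h2 : 2 ≤ (pvPos t ++ [(t.length : Int)]).length := by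
          simp; omega
        rw [if_pos h2]
        have : (pvPos t ++ [((t.length : Int))]).length - 2 = (pvPos t).length - 1 := by simp
        rw [this]
        congr 1
        rw [List.getD, List.getD, List.getElem?_append_left (by omega)]
    · simp only [List.reverse_singleton, List.singleton_append]
      simp only [pvCharLoop, h, List.length_append]
      rw [show ((t.length + [c].length : Nat) : Int) - 1 = (t.length : Int) from by simp]
      rw [ih, pvPos_append]
      simp [h]

lemma map_reverse_pyGetD (t : List Char) :
    ((PySem.List.pyRange 0 (t.length : Int) 1).reverse.map (fun i => PySem.List.pyGetD t i ' ')) = t.reverse := by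
  rw [List.map_reverse, PySem.List.map_pyGetD_pyRange_zero']

lemma wso_eq (t : List Char) :
    pvALoop t ((PySem.List.pyRange 0 (t.length : Int) 1).reverse) (t.length : Int) false
      = if 2 ≤ (pvPos t).length then PySem.List.pyGetD (pvPos t) (-2) 0 + 1 else 0 := by
  rw [pvALoop_eq_charLoop, map_reverse_pyGetD, charLoop_false]
  by_cases h2 : 2 ≤ (pvPos t).length
  · rw [if_pos h2, if_pos h2]
    congr 1
    rw [PySem.List.pyGetD_neg_ofNat (pvPos t) 2 0 (by omega) h2]
    rw [List.getD, List.getElem?_eq_getElem (by omega)]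
    rfl
  · rw [if_neg h2, if_neg h2]

-- ===== VERDICT (by name: the statement is the Claim_ definition above) =====
theorem add_trailing_dots_spec : Claim_equal_add_trailing_dots := by
  intro summary _
  unfold Spec_add_trailing_dots add_trailing_dots add_trailing_dots_alt
  simp only []
  rw [wso_eq]
  rfl
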